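-- pv_equiv track=rewrite | github.com/clair-hu/SensorTower | KCF_tracker/vector_tracker_with_background_extration.py | isInBboxes
-- ===== SOURCE A (Python) =====
-- def isInBboxes(x, y, w, h, bboxes):
--     for a in range(x-3,x+4):
--         for b in range(y-3, y+4):
--             for w1 in range(w-3, w+4):
--                 for h1 in range(h-3, h+4):
--                     if (a,b,w1,h1) in bboxes:
--                         return True
--     return False
-- ===== SOURCE B (Python) =====
-- def isInBboxes(x, y, w, h, bboxes):
--     for box in bboxes:
--         bx, by, bw, bh = box
--         if abs(bx - x) <= 3 and abs(by - y) <= 3 and abs(bw - w) <= 3 and abs(bh - h) <= 3: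
--             return True
--     return False
-- ===== Notes on version B (the rewrite author's own statement) =====
-- stated objective: faster
-- what changed: Instead of enumerating the 7^4 = 2401 neighbourhood tuples and testing membership in bboxes for each, B makes a single pass over bboxes and checks each box's four coordinates are within +/-3.
import Mathlib
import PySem

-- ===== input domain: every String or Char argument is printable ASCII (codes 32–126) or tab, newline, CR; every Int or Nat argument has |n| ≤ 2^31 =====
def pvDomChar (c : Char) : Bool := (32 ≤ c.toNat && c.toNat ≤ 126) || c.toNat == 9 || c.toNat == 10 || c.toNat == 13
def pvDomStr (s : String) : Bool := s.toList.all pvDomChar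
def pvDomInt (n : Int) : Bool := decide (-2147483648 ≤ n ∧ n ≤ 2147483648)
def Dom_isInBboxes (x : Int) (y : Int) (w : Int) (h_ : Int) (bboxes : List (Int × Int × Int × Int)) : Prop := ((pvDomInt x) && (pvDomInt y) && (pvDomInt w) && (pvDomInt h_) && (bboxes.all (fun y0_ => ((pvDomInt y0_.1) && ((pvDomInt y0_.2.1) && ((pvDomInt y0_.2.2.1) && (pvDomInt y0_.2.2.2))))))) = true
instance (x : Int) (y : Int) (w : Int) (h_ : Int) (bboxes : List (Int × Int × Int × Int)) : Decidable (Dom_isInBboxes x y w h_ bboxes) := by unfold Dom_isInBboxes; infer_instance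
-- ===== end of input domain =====

-- B replaces A's 7^4-tuple neighbourhood enumeration by a single pass over bboxes testing each coordinate within ±3 (faster by a large constant factor).


-- ===== PORT A =====
-- A: four nested for-loops over range(v-3, v+4) with early return on tuple membership
def isInBboxes (x : Int) (y : Int) (w : Int) (h_ : Int) (bboxes : List (Int × Int × Int × Int)) : Bool :=
  (PySem.List.pyRange (x-3) (x+4) 1).any fun a =>
    (PySem.List.pyRange (y-3) (y+4) 1).any fun b =>
      (PySem.List.pyRange (w-3) (w+4) 1).any fun w1 =>
        (PySem.List.pyRange (h_-3) (h_+4) 1).any fun h1 =>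
          decide ((a, b, w1, h1) ∈ bboxes)

-- ===== PORT B =====
-- B: one pass over bboxes, each coordinate checked to lie within ±3
def isInBboxes_alt (x : Int) (y : Int) (w : Int) (h_ : Int) (bboxes : List (Int × Int × Int × Int)) : Bool :=
  bboxes.any fun box =>
    decide (|box.1 - x| ≤ 3 ∧ |box.2.1 - y| ≤ 3 ∧ |box.2.2.1 - w| ≤ 3 ∧ |box.2.2.2 - h_| ≤ 3)

-- ===== PRECONDITION & SPEC =====
def Spec_isInBboxes (x : Int) (y : Int) (w : Int) (h_ : Int) (bboxes : List (Int × Int × Int × Int)) (out : Bool) : Prop := out = isInBboxes_alt x y w h_ bboxes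
instance (x : Int) (y : Int) (w : Int) (h_ : Int) (bboxes : List (Int × Int × Int × Int)) (out : Bool) : Decidable (Spec_isInBboxes x y w h_ bboxes out) := by unfold Spec_isInBboxes; infer_instance

-- ===== CLAIM (what is proved, stated in full; the proofs are below) =====
def Claim_equal_isInBboxes : Prop := ∀ (x : Int) (y : Int) (w : Int) (h_ : Int) (bboxes : List (Int × Int × Int × Int)), Dom_isInBboxes x y w h_ bboxes → Spec_isInBboxes x y w h_ bboxes (isInBboxes x y w h_ bboxes)

-- ===== LEMMAS AND PROOFS =====

-- ===== VERDICT (by name: the statement is the Claim_ definition above) =====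
theorem isInBboxes_spec : Claim_equal_isInBboxes := by
  intro x y w h_ bboxes _
  unfold Spec_isInBboxes isInBboxes isInBboxes_alt
  rw [Bool.eq_iff_iff]
  simp only [List.any_eq_true, PySem.List.mem_pyRange_one, decide_eq_true_eq]
  constructor
  · rintro ⟨a, ⟨ha1, ha2⟩, b, ⟨hb1, hb2⟩, w1, ⟨hw1, hw2⟩, h1, ⟨hh1, hh2⟩, hmem⟩
    refine ⟨(a, b, w1, h1), hmem, ?_⟩
    simp only [abs_le]
    omega
  · rintro ⟨⟨bx, by_, bw, bh⟩, hmem, hc⟩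
    simp only [abs_le] at hc
    exact ⟨bx, by omega, by_, by omega, bw, by omega, bh, by omega, hmem⟩
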